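-- pv_equiv track=rewrite | github.com/QSQX-HAN/libsigpore | src/proj_het/hbbmm.py | is_distmuts_valid
-- ===== SOURCE A (Python) =====
-- def is_distmuts_valid(bs, distmuts_threshold=4):
--     """
--     Additional constraint from DREEM
--     Function copied from EM_Functions.py
--     @author DREEM
--     """
--     for i in range(len(bs)):
--         if bs[i] == '1':
--             try:
--                 if i - latest_mutbit_index < distmuts_threshold:
--                     return False
--             except NameError:  # This happens the first time we see a '1'
--                 None
--             latest_mutbit_index = i
--     return True
-- ===== SOURCE B (Python) =====
-- def is_distmuts_valid(bs, distmuts_threshold=4):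
--     pos = [i for i, c in enumerate(bs) if c == '1']
--     return all(b - a >= distmuts_threshold for a, b in zip(pos, pos[1:]))
-- ===== Notes on version B (the rewrite author's own statement) =====
-- stated objective: simpler
-- what changed: Replaces the running last-index variable with NameError guard by a two-phase form: collect the mutation positions, then check every consecutive gap pairwise.
import Mathlib
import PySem

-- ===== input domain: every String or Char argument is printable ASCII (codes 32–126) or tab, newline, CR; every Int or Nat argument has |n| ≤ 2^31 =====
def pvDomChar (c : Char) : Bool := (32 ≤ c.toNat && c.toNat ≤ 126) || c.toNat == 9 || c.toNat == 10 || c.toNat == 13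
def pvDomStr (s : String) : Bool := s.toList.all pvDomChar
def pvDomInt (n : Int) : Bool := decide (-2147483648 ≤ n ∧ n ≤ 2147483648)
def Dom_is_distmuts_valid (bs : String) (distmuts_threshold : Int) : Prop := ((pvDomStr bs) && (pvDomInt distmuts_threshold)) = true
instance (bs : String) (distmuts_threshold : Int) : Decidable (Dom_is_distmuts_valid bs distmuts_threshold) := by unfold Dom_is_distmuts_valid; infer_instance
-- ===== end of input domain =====

-- B replaces A's single scan with a running last-index variable (and NameError guard)
-- by a two-phase form: collect the '1' positions, then check consecutive gaps (simpler).

-- ===== PORT A =====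
-- A's loop: index i, optional latest_mutbit_index (none = variable not yet bound, NameError branch)
def isDistmutsGoA : List Char → Int → Option Int → Int → Bool
  | [], _, _, _ => true
  | c :: rest, i, last, t =>
    if c = '1' then
      match last with
      | some l => if i - l < t then false else isDistmutsGoA rest (i + 1) (some i) t
      | none => isDistmutsGoA rest (i + 1) (some i) t
    else isDistmutsGoA rest (i + 1) last t

def is_distmuts_valid (bs : String) (distmuts_threshold : Int) : Bool :=
  isDistmutsGoA bs.toList 0 none distmuts_threshold

-- ===== PORT B =====
def is_distmuts_valid_alt (bs : String) (distmuts_threshold : Int) : Bool :=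
  let pos : List Int :=
    (PySem.List.enumerate bs.toList).filterMap (fun p => if p.2 = '1' then some p.1 else none)
  (pos.zip pos.tail).all (fun p => decide (p.2 - p.1 ≥ distmuts_threshold))

-- ===== PRECONDITION & SPEC =====
def Spec_is_distmuts_valid (bs : String) (distmuts_threshold : Int) (out : Bool) : Prop := out = is_distmuts_valid_alt bs distmuts_threshold
instance (bs : String) (distmuts_threshold : Int) (out : Bool) : Decidable (Spec_is_distmuts_valid bs distmuts_threshold out) := by unfold Spec_is_distmuts_valid; infer_instance

-- ===== CLAIM (what is proved, stated in full; the proofs are below) =====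
def Claim_equal_is_distmuts_valid : Prop := ∀ (bs : String) (distmuts_threshold : Int), Dom_is_distmuts_valid bs distmuts_threshold → Spec_is_distmuts_valid bs distmuts_threshold (is_distmuts_valid bs distmuts_threshold)

-- ===== LEMMAS AND PROOFS =====

-- positions of '1' characters starting at index i
def isDistmutsPos : List Char → Int → List Int
  | [], _ => []
  | c :: rest, i => if c = '1' then i :: isDistmutsPos rest (i + 1) else isDistmutsPos rest (i + 1)

-- pairwise gap check from B
def isDistmutsPairs (ps : List Int) (t : Int) : Bool :=
  (ps.zip ps.tail).all (fun p => decide (p.2 - p.1 ≥ t))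

lemma pairs_cons_cons (a b : Int) (ps : List Int) (t : Int) :
    isDistmutsPairs (a :: b :: ps) t = (decide (b - a ≥ t) && isDistmutsPairs (b :: ps) t) := by
  simp [isDistmutsPairs]

-- A's loop computes the pairwise check on (last ++ remaining positions)
lemma goA_eq_pairs (l : List Char) (i : Int) (last : Option Int) (t : Int) :
    isDistmutsGoA l i last t =
      isDistmutsPairs ((last.toList) ++ isDistmutsPos l i) t := by
  induction l generalizing i last with
  | nil => cases last <;> simp [isDistmutsGoA, isDistmutsPairs, isDistmutsPos]
  | cons c rest ih =>
    by_cases hc : c = '1'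
    · cases last with
      | none =>
        simp [isDistmutsGoA, hc, isDistmutsPos, ih]
      | some l0 =>
        simp only [isDistmutsGoA, hc, if_pos, isDistmutsPos, Option.toList,
          List.cons_append, List.nil_append, ih]
        rw [pairs_cons_cons]
        by_cases h : i - l0 < t
        · simp [h, show ¬ (i - l0 ≥ t) by omega]
        · simp [h, show i - l0 ≥ t by omega]
    · cases last <;> simp [isDistmutsGoA, hc, isDistmutsPos, ih]

-- B's filterMap over enumerate is isDistmutsPos
lemma filterMap_enumerate_eq_pos (l : List Char) (i : Int) :
    (PySem.List.enumerate l i).filterMap (fun p => if p.2 = '1' then some p.1 else none)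
      = isDistmutsPos l i := by
  induction l generalizing i with
  | nil => simp [PySem.List.enumerate_nil, isDistmutsPos]
  | cons c rest ih =>
    by_cases hc : c = '1' <;> simp [PySem.List.enumerate_cons, hc, isDistmutsPos, ih]

-- ===== VERDICT (by name: the statement is the Claim_ definition above) =====
theorem is_distmuts_valid_spec : Claim_equal_is_distmuts_valid := by
  intro bs t _
  unfold Spec_is_distmuts_valid is_distmuts_valid is_distmuts_valid_alt
  rw [goA_eq_pairs, filterMap_enumerate_eq_pos]
  simp only [Option.toList, List.nil_append]
  rfl
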